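-- pv_equiv track=rewrite | github.com/viettham/color-analyzer-streamlit | app.py | analyze_colors
-- ===== SOURCE A (Python) =====
-- def analyze_colors(color_data):
--     s_values = []
--     s_values1 = []
--     s_values0 = []
--     s_values2 = []
--     s_values3 = []
--     s = 0
--     s1=0
--     s0,s2,s3=0,0,0
--     for i in range(len(color_data)):
--         if i<len(color_data) - 4:
--             c = color_data[i:i+5]
--
--             # Mẫu s += 1
--             if (c[0] == "#000000" and c[1] == "#000000" and c[2] != "#000000" and c[3] == "#000000" and c[4] == "#000000") or \
--             (c[0] != "#000000" and c[1] != "#000000" and c[2] == "#000000" and c[3] != "#000000" and c[4] != "#000000"):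
--                 s += 1
--                 s1=0
--
--             # Mẫu s = 0
--             elif (c[0] == "#000000" and c[1] == "#000000" and c[2] != "#000000" and c[3] == "#000000" and c[4] != "#000000") or \
--                 (c[0] != "#000000" and c[1] != "#000000" and c[2] == "#000000" and c[3] != "#000000" and c[4] == "#000000"):
--                 s = 0
--                 s1+=1
--
--             # Trường hợp khác giữ nguyên s
--             s_values.append(s)
--             s_values1.append(s1)
--         if i<len(color_data) - 3:
--             c = color_data[i:i+4]
--
--             # Mẫu s += 1
--             if (c[0] == "#000000" and c[1] == "#000000" and c[2] != "#000000" and c[3] == "#000000") or \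
--             (c[0] != "#000000" and c[1] != "#000000" and c[2] == "#000000" and c[3] != "#000000"):
--                 s2 += 1
--                 s3=0
--
--             # Mẫu s = 0
--             elif (c[0] == "#000000" and c[1] == "#000000" and c[2] != "#000000" and c[3] != "#000000") or \
--                 (c[0] != "#000000" and c[1] != "#000000" and c[2] == "#000000" and c[3] == "#000000"):
--                 s2 = 0
--                 s3+=1
--
--             # Trường hợp khác giữ nguyên s
--             s_values2.append(s2)
--             s_values3.append(s3)
--         if color_data[i]=="#000000":
--             s0=0
--         else:
--             s0=1
--         s_values0.append(s0)
--     return s_values0,s_values1,s_values2,s_values3,s_values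
-- ===== SOURCE B (Python) =====
-- def _classify4(bits, i):
--     # event code of the width-4 window at i: 1 = increment, -1 = reset, 0 = keep
--     b0, b1, b2, b3 = bits[i:i + 4]
--     if b1 != b0 or b2 == b0:
--         return 0
--     return 1 if b3 == b0 else -1
--
--
-- def _classify5(bits, i):
--     # event code of the width-5 window at i
--     b0, b1, b2, b3, b4 = bits[i:i + 5]
--     if b1 != b0 or b2 == b0 or b3 != b0:
--         return 0
--     return 1 if b4 == b0 else -1
--
--
-- def _counters(events):
--     # counter values as differences of prefix counts: the increment counter at i
--     # is the number of +1 events since the last -1 event, i.e. pa[i+1]-pa[lb+1];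
--     # no running counter state is kept.
--     pa = [0]
--     pb = [0]
--     for e in events:
--         pa.append(pa[-1] + (1 if e == 1 else 0))
--         pb.append(pb[-1] + (1 if e == -1 else 0))
--     inc, rst = [], []
--     la = lb = -1
--     for i, e in enumerate(events):
--         if e == 1:
--             la = i
--         elif e == -1:
--             lb = i
--         inc.append(pa[i + 1] - pa[lb + 1])
--         rst.append(pb[i + 1] - pb[la + 1])
--     return inc, rst
--
--
-- def analyze_colors(color_data):
--     bits = [0 if c == "#000000" else 1 for c in color_data]
--     n = len(bits)
--     e4 = [_classify4(bits, i) for i in range(n - 3)]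
--     e5 = [_classify5(bits, i) for i in range(n - 4)]
--     s_values2, s_values3 = _counters(e4)
--     s_values, s_values1 = _counters(e5)
--     return bits, s_values1, s_values2, s_values3, s_values
-- ===== Notes on version B (the rewrite author's own statement) =====
-- stated objective: alternative
-- what changed: B replaces A's running reset/increment state machine entirely: it classifies each window once into an event code (+1/-1/0), builds prefix-count arrays of the events, and reads every counter value off as a difference of two prefix counts (pa[i+1]-pa[last_reset+1]) instead of maintaining any running counter.
import Mathlib
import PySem

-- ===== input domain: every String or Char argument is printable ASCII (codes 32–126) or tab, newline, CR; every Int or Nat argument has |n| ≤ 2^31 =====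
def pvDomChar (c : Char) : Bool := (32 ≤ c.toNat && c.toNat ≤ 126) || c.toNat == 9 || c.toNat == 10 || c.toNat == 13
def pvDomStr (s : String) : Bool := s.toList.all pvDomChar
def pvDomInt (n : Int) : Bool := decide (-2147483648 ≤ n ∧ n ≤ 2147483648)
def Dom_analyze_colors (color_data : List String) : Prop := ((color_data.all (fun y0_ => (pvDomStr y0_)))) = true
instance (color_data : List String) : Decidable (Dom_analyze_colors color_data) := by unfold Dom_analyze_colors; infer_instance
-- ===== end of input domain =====

-- B replaces A's running reset/increment counters by per-window event codes plus
-- prefix-count arrays: each counter value is read off as a difference of two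
-- prefix counts (alternative algorithm, same asymptotic cost).

def pvBlack : String := "#000000"

-- ===== PORT A =====
-- A-side helpers: the three independent per-iteration blocks of A's single loop,
-- in the order the Python body performs them.

-- body of the 'i < len - 4' block (c = color_data[i:i+5]; c[j] via pyGetD, exact: c has length 5 there)
def pvCoreA5 (cd : List String) (st : List Int × List Int × Int × Int) (i : Int) :
    List Int × List Int × Int × Int :=
  let (sv, sv1, s, s1) := st
  let c := PySem.List.slice cd (some i) (some (i + 5))
  let c0 := PySem.List.pyGetD c 0 ""
  let c1 := PySem.List.pyGetD c 1 ""
  let c2 := PySem.List.pyGetD c 2 ""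
  let c3 := PySem.List.pyGetD c 3 ""
  let c4 := PySem.List.pyGetD c 4 ""
  if (c0 = pvBlack ∧ c1 = pvBlack ∧ ¬ c2 = pvBlack ∧ c3 = pvBlack ∧ c4 = pvBlack) ∨
     (¬ c0 = pvBlack ∧ ¬ c1 = pvBlack ∧ c2 = pvBlack ∧ ¬ c3 = pvBlack ∧ ¬ c4 = pvBlack) then
    (sv ++ [s + 1], sv1 ++ [(0 : Int)], s + 1, 0)
  else if (c0 = pvBlack ∧ c1 = pvBlack ∧ ¬ c2 = pvBlack ∧ c3 = pvBlack ∧ ¬ c4 = pvBlack) ∨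
          (¬ c0 = pvBlack ∧ ¬ c1 = pvBlack ∧ c2 = pvBlack ∧ ¬ c3 = pvBlack ∧ c4 = pvBlack) then
    (sv ++ [(0 : Int)], sv1 ++ [s1 + 1], 0, s1 + 1)
  else
    (sv ++ [s], sv1 ++ [s1], s, s1)

def pvStepA5 (cd : List String) (n : Int) (st : List Int × List Int × Int × Int) (i : Int) :
    List Int × List Int × Int × Int :=
  if i < n - 4 then pvCoreA5 cd st i else st

-- body of the 'i < len - 3' block (c = color_data[i:i+4])
def pvCoreA4 (cd : List String) (st : List Int × List Int × Int × Int) (i : Int) :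
    List Int × List Int × Int × Int :=
  let (sv2, sv3, s2, s3) := st
  let c := PySem.List.slice cd (some i) (some (i + 4))
  let c0 := PySem.List.pyGetD c 0 ""
  let c1 := PySem.List.pyGetD c 1 ""
  let c2 := PySem.List.pyGetD c 2 ""
  let c3 := PySem.List.pyGetD c 3 ""
  if (c0 = pvBlack ∧ c1 = pvBlack ∧ ¬ c2 = pvBlack ∧ c3 = pvBlack) ∨
     (¬ c0 = pvBlack ∧ ¬ c1 = pvBlack ∧ c2 = pvBlack ∧ ¬ c3 = pvBlack) then
    (sv2 ++ [s2 + 1], sv3 ++ [(0 : Int)], s2 + 1, 0)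
  else if (c0 = pvBlack ∧ c1 = pvBlack ∧ ¬ c2 = pvBlack ∧ ¬ c3 = pvBlack) ∨
          (¬ c0 = pvBlack ∧ ¬ c1 = pvBlack ∧ c2 = pvBlack ∧ c3 = pvBlack) then
    (sv2 ++ [(0 : Int)], sv3 ++ [s3 + 1], 0, s3 + 1)
  else
    (sv2 ++ [s2], sv3 ++ [s3], s2, s3)

def pvStepA4 (cd : List String) (n : Int) (st : List Int × List Int × Int × Int) (i : Int) :
    List Int × List Int × Int × Int :=
  if i < n - 3 then pvCoreA4 cd st i else st

-- the unconditional s0 block (color_data[i] via pyGetD, exact: 0 ≤ i < len)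
def pvStepA0 (cd : List String) (st : List Int × Int) (i : Int) : List Int × Int :=
  let s0 : Int := if PySem.List.pyGetD cd i "" = pvBlack then 0 else 1
  (st.1 ++ [s0], s0)

def analyze_colors (color_data : List String) :
    List Int × List Int × List Int × List Int × List Int :=
  let n : Int := color_data.length
  let r := (PySem.List.pyRange 0 n 1).foldl
    (fun st i => (pvStepA5 color_data n st.1 i, pvStepA4 color_data n st.2.1 i,
                  pvStepA0 color_data st.2.2 i))
    (([], [], 0, 0), ([], [], 0, 0), ([], 0))
  (r.2.2.1, r.1.2.1, r.2.1.1, r.2.1.2.1, r.1.1)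

-- ===== PORT B =====
-- B-side helpers (transcribing Source B)

def pvBits (cd : List String) : List Int := cd.map (fun c => if c = pvBlack then 0 else 1)

-- event code of the width-4 window at i (bits[i:i+4] is in range at every call site)
def pvClassify4 (bits : List Int) (i : Nat) : Int :=
  let b0 := bits.getD i 0
  let b1 := bits.getD (i + 1) 0
  let b2 := bits.getD (i + 2) 0
  let b3 := bits.getD (i + 3) 0
  if b1 ≠ b0 ∨ b2 = b0 then 0
  else if b3 = b0 then 1 else -1

-- event code of the width-5 window at i
def pvClassify5 (bits : List Int) (i : Nat) : Int :=
  let b0 := bits.getD i 0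
  let b1 := bits.getD (i + 1) 0
  let b2 := bits.getD (i + 2) 0
  let b3 := bits.getD (i + 3) 0
  let b4 := bits.getD (i + 4) 0
  if b1 ≠ b0 ∨ b2 = b0 ∨ b3 ≠ b0 then 0
  else if b4 = b0 then 1 else -1

-- the enumerate-loop body of _counters
def pvPSStep (pa pb : List Int) (st : List Int × List Int × Int × Int) (ie : Int × Int) :
    List Int × List Int × Int × Int :=
  let la := if ie.2 = 1 then ie.1 else st.2.2.1
  let lb := if ie.2 = -1 then ie.1 else st.2.2.2
  (st.1 ++ [PySem.List.pyGetD pa (ie.1 + 1) 0 - PySem.List.pyGetD pa (lb + 1) 0],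
   st.2.1 ++ [PySem.List.pyGetD pb (ie.1 + 1) 0 - PySem.List.pyGetD pb (la + 1) 0],
   la, lb)

def pvCounters (events : List Int) : List Int × List Int :=
  let p := events.foldl
    (fun (p : List Int × List Int) e =>
      (p.1 ++ [p.1.getLastD 0 + if e = 1 then 1 else 0],
       p.2 ++ [p.2.getLastD 0 + if e = -1 then 1 else 0])) ([0], [0])
  let r := (PySem.List.enumerate events 0).foldl (pvPSStep p.1 p.2) ([], [], -1, -1)
  (r.1, r.2.1)

def analyze_colors_alt (color_data : List String) :
    List Int × List Int × List Int × List Int × List Int :=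
  let bits := pvBits color_data
  let n := bits.length
  let e4 := (List.range (n - 3)).map (pvClassify4 bits)
  let e5 := (List.range (n - 4)).map (pvClassify5 bits)
  let p4 := pvCounters e4
  let p5 := pvCounters e5
  (bits, p5.2, p4.1, p4.2, p5.1)

-- ===== PRECONDITION & SPEC =====
def Spec_analyze_colors (color_data : List String) (out : List Int × List Int × List Int × List Int × List Int) : Prop := out = analyze_colors_alt color_data
instance (color_data : List String) (out : List Int × List Int × List Int × List Int × List Int) : Decidable (Spec_analyze_colors color_data out) := by unfold Spec_analyze_colors; infer_instance

-- ===== CLAIM =====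
def Claim_equal_analyze_colors : Prop := ∀ (color_data : List String), Dom_analyze_colors color_data → Spec_analyze_colors color_data (analyze_colors color_data)

-- ===== LEMMAS AND PROOFS =====

theorem pv_prefix_char (v : Int) (E : List Int) :
    E.foldl (fun (l : List Int) e => l ++ [l.getLastD 0 + if e = v then 1 else 0]) [0]
      = (List.range (E.length + 1)).map (fun j => ((E.take j).count v : Int)) := by
  induction E using List.reverseRecOn with
  | nil => simp
  | append_singleton E e ih =>
    rw [List.foldl_append, ih]
    simp only [List.foldl_cons, List.foldl_nil]
    have hlast : ((List.range (E.length + 1)).map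
        (fun j => ((E.take j).count v : Int))).getLastD 0 = (E.count v : Int) := by
      rw [List.range_succ, List.map_append]
      simp
    rw [hlast]
    have hR : List.range (E.length + 1 + 1) = List.range (E.length + 1) ++ [E.length + 1] := by
      rw [List.range_succ]
    rw [List.length_append, List.length_singleton, hR, List.map_append]
    congr 1
    · apply List.map_congr_left
      intro j hj
      have hj' : j ≤ E.length := by
        have := List.mem_range.mp hj; omega
      rw [List.take_append_of_le_length hj']
    · simp only [List.map_cons, List.map_nil]
      have ht : List.take (E.length + 1) (E ++ [e]) = E ++ [e] := by
        apply List.take_of_length_le; simp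
      rw [ht, List.count_append]
      push_cast
      congr 1
      simp [List.count_singleton]

theorem pv_prefix_read (v : Int) (E : List Int) (j : Int) (h0 : 0 ≤ j) (h1 : j ≤ E.length) :
    PySem.List.pyGetD
      ((List.range (E.length + 1)).map (fun j => ((E.take j).count v : Int))) j 0
      = ((E.take j.toNat).count v : Int) := by
  rw [PySem.List.pyGetD_eq_getElem]
  · simp
  · exact h0
  · simp; omega

def pvSMStep (st : List Int × List Int × Int × Int) (e : Int) :
    List Int × List Int × Int × Int :=
  if e = 1 then (st.1 ++ [st.2.2.1 + 1], st.2.1 ++ [(0 : Int)], st.2.2.1 + 1, 0)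
  else if e = -1 then (st.1 ++ [(0 : Int)], st.2.1 ++ [st.2.2.2 + 1], 0, st.2.2.2 + 1)
  else (st.1 ++ [st.2.2.1], st.2.1 ++ [st.2.2.2], st.2.2.1, st.2.2.2)

def pvPA (v : Int) (E : List Int) : List Int :=
  (List.range (E.length + 1)).map (fun j => ((E.take j).count v : Int))

def pvS (E : List Int) (i : Nat) : List Int × List Int × Int × Int :=
  (E.take i).foldl pvSMStep ([], [], 0, 0)

def pvT (E : List Int) (i : Nat) : List Int × List Int × Int × Int :=
  ((PySem.List.enumerate E 0).take i).foldl (pvPSStep (pvPA 1 E) (pvPA (-1) E)) ([], [], -1, -1)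

theorem pv_read (v : Int) (E : List Int) (j : Int) (h0 : 0 ≤ j) (h1 : j ≤ E.length) :
    PySem.List.pyGetD (pvPA v E) j 0 = ((E.take j.toNat).count v : Int) :=
  pv_prefix_read v E j h0 h1

theorem pv_inv (E : List Int) (i : Nat) (hi : i ≤ E.length) :
    (pvS E i).1 = (pvT E i).1 ∧ (pvS E i).2.1 = (pvT E i).2.1 ∧
    -1 ≤ (pvT E i).2.2.1 ∧ (pvT E i).2.2.1 < (i : Int) ∧
    -1 ≤ (pvT E i).2.2.2 ∧ (pvT E i).2.2.2 < (i : Int) ∧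
    (pvS E i).2.2.1
      = ((E.take i).count 1 : Int) - ((E.take ((pvT E i).2.2.2 + 1).toNat).count 1 : Int) ∧
    (pvS E i).2.2.2
      = ((E.take i).count (-1) : Int) - ((E.take ((pvT E i).2.2.1 + 1).toNat).count (-1) : Int) := by
  induction i with
  | zero =>
    simp [pvS, pvT]
  | succ i ih =>
    have hE : i < E.length := by omega
    obtain ⟨h1, h2, h3, h4, h5, h6, h7, h8⟩ := ih (by omega)
    have htk : E.take (i + 1) = E.take i ++ [E[i]] := by
      rw [List.take_add_one, List.getElem?_eq_getElem hE]; rfl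
    have hS : pvS E (i + 1) = pvSMStep (pvS E i) E[i] := by
      unfold pvS
      rw [htk, List.foldl_append, List.foldl_cons, List.foldl_nil]
    have hT : pvT E (i + 1)
        = pvPSStep (pvPA 1 E) (pvPA (-1) E) (pvT E i) ((i : Int), E[i]) := by
      unfold pvT
      have hlen : i < (PySem.List.enumerate E 0).length := by
        rw [PySem.List.length_enumerate]; omega
      have htk2 : (PySem.List.enumerate E 0).take (i + 1)
          = (PySem.List.enumerate E 0).take i ++ [((i : Int), E[i])] := by
        rw [List.take_add_one, List.getElem?_eq_getElem hlen, PySem.List.getElem_enumerate]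
        norm_num
      rw [htk2, List.foldl_append, List.foldl_cons, List.foldl_nil]
    rw [hS, hT]
    have hrA1 : PySem.List.pyGetD (pvPA 1 E) ((i : Int) + 1) 0
        = ((E.take (i + 1)).count 1 : Int) := by
      rw [pv_read 1 E _ (by omega) (by omega)]
      have h' : ((i : Int) + 1).toNat = i + 1 := by omega
      rw [h']
    have hrB1 : PySem.List.pyGetD (pvPA (-1) E) ((i : Int) + 1) 0
        = ((E.take (i + 1)).count (-1) : Int) := by
      rw [pv_read (-1) E _ (by omega) (by omega)]
      have h' : ((i : Int) + 1).toNat = i + 1 := by omega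
      rw [h']
    have hrA2 : PySem.List.pyGetD (pvPA 1 E) ((pvT E i).2.2.2 + 1) 0
        = ((E.take ((pvT E i).2.2.2 + 1).toNat).count 1 : Int) :=
      pv_read 1 E _ (by omega) (by omega)
    have hrB2 : PySem.List.pyGetD (pvPA (-1) E) ((pvT E i).2.2.1 + 1) 0
        = ((E.take ((pvT E i).2.2.1 + 1).toNat).count (-1) : Int) :=
      pv_read (-1) E _ (by omega) (by omega)
    by_cases he1 : E[i] = 1
    · have hc1 : (E.take (i + 1)).count 1 = (E.take i).count 1 + 1 := by
        rw [htk, List.count_append]; simp [he1]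
      have hc2 : (E.take (i + 1)).count (-1) = (E.take i).count (-1) := by
        rw [htk, List.count_append]; simp [he1]
      simp only [pvSMStep, pvPSStep, he1]
      norm_num
      rw [hrA1, hrA2]
      exact ⟨⟨h1, by omega⟩, h2, h5, by omega, by omega⟩
    · by_cases he2 : E[i] = -1
      · have hc1 : (E.take (i + 1)).count 1 = (E.take i).count 1 := by
          rw [htk, List.count_append]; simp [he2]
        have hc2 : (E.take (i + 1)).count (-1) = (E.take i).count (-1) + 1 := by
          rw [htk, List.count_append]; simp [he2]
        simp only [pvSMStep, pvPSStep, he2]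
        norm_num
        rw [hrB1, hrB2]
        exact ⟨h1, ⟨h2, by omega⟩, h3, by omega, by omega⟩
      · have hc1 : (E.take (i + 1)).count 1 = (E.take i).count 1 := by
          rw [htk, List.count_append]; simp [he1]
        have hc2 : (E.take (i + 1)).count (-1) = (E.take i).count (-1) := by
          rw [htk, List.count_append]; simp [he2]
        simp only [pvSMStep, pvPSStep, if_neg he1, if_neg he2]
        rw [hrA1, hrB1, hrA2, hrB2]
        refine ⟨?_, ?_, h3, by omega, h5, by omega, by omega, by omega⟩
        · rw [h1]; congr 2; omega
        · rw [h2]; congr 2; omega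

theorem pv_foldl_prod2 {α β ι : Type} (f : α → ι → α) (g : β → ι → β)
    (l : List ι) (a : α) (b : β) :
    l.foldl (fun st i => (f st.1 i, g st.2 i)) (a, b) = (l.foldl f a, l.foldl g b) := by
  induction l generalizing a b with
  | nil => rfl
  | cons x xs ih => simp [List.foldl_cons, ih]

theorem pv_sm_eq_counters (E : List Int) :
    pvCounters E = ((E.foldl pvSMStep ([], [], 0, 0)).1, (E.foldl pvSMStep ([], [], 0, 0)).2.1) := by
  obtain ⟨h1, h2, -, -, -, -, -, -⟩ := pv_inv E E.length (le_refl _)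
  have hS : pvS E E.length = E.foldl pvSMStep ([], [], 0, 0) := by
    unfold pvS; rw [List.take_length]
  have hT : pvT E E.length
      = (PySem.List.enumerate E 0).foldl (pvPSStep (pvPA 1 E) (pvPA (-1) E)) ([], [], -1, -1) := by
    unfold pvT
    rw [List.take_of_length_le (by rw [PySem.List.length_enumerate])]
  simp only [pvCounters]
  rw [pv_foldl_prod2 (fun (l : List Int) e => l ++ [l.getLastD 0 + if e = 1 then 1 else 0])
       (fun (l : List Int) e => l ++ [l.getLastD 0 + if e = (-1 : Int) then 1 else 0]) E [0] [0]]
  simp only [pv_prefix_char 1 E, pv_prefix_char (-1) E]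
  rw [show (List.range (E.length + 1)).map (fun j => ((E.take j).count 1 : Int)) = pvPA 1 E from rfl,
      show (List.range (E.length + 1)).map (fun j => ((E.take j).count (-1) : Int)) = pvPA (-1) E from rfl,
      ← hT]
  rw [← hS, h1, h2]

-- A's guarded fold over the full range reduces to the event state machine
theorem pv_foldl_prod3 {α β γ ι : Type} (f : α → ι → α) (g : β → ι → β) (h : γ → ι → γ)
    (l : List ι) (a : α) (b : β) (c : γ) :
    l.foldl (fun st i => (f st.1 i, g st.2.1 i, h st.2.2 i)) (a, b, c)
      = (l.foldl f a, l.foldl g b, l.foldl h c) := by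
  induction l generalizing a b c with
  | nil => rfl
  | cons x xs ih => simp [List.foldl_cons, ih]

theorem pv_foldl_range_guard {α : Type} (f : α → Nat → α) (m n : Nat) (st : α) :
    (List.range n).foldl (fun st k => if k < m then f st k else st) st
      = (List.range (min m n)).foldl f st := by
  induction n with
  | zero => simp
  | succ n ih =>
    rw [List.range_succ, List.foldl_append, ih]
    by_cases hn : n < m
    · have h1 : min m (n + 1) = min m n + 1 := by omega
      have h2 : min m n = n := by omega
      rw [h1, h2, List.range_succ, List.foldl_append]
      simp [hn]
    · have h1 : min m (n + 1) = min m n := by omega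
      rw [h1]
      simp [hn]

theorem pv_foldl_congr {α ι : Type} {f g : α → ι → α} {l : List ι} (st : α)
    (h : ∀ a i, i ∈ l → f a i = g a i) : l.foldl f st = l.foldl g st := by
  induction l generalizing st with
  | nil => rfl
  | cons x xs ih => rw [List.foldl_cons, List.foldl_cons, h st x (by simp), ih]
                    intro a i hi; exact h a i (by simp [hi])

theorem pv_foldl_pyRange {α : Type} (F : α → Int → α) (n : Nat) (st : α) :
    (PySem.List.pyRange 0 (n : Int) 1).foldl F st
      = (List.range n).foldl (fun a (k : Nat) => F a (k : Int)) st := by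
  rw [PySem.List.pyRange_one, List.foldl_map]
  have h1 : ((n : Int) - 0).toNat = n := by omega
  rw [h1]
  exact pv_foldl_congr st (fun a k _ => by norm_num)

-- indexing a take-of-drop window
theorem pv_getD_td (cd : List String) (k j m : Nat) (hj : j < m) (hk : k + m ≤ cd.length) :
    (List.take m (List.drop k cd)).getD j "" = cd.getD (k + j) "" := by
  have hlen : (List.take m (List.drop k cd)).length = m := by
    simp [List.length_take, List.length_drop]; omega
  rw [List.getD_eq_getElem _ _ (by omega), List.getD_eq_getElem _ _ (by omega)]
  simp [List.getElem_take, List.getElem_drop]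

-- bits accessor characterisation
theorem pv_bits_getD (cd : List String) (j : Nat) (hj : j < cd.length) :
    (pvBits cd).getD j 0 = if cd.getD j "" = pvBlack then 0 else 1 := by
  unfold pvBits
  rw [List.getD_eq_getElem _ _ (by simpa using hj), List.getD_eq_getElem _ _ hj]
  simp

-- pointwise: A's 5-window body is the event state machine on the classified window
theorem pv_core5_eq (cd : List String) (st : List Int × List Int × Int × Int) (k : Nat)
    (hk : k < cd.length - 4) :
    pvCoreA5 cd st (k : Int) = pvSMStep st (pvClassify5 (pvBits cd) k) := by
  obtain ⟨sv, sv1, s, s1⟩ := st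
  have hk5 : k + 5 ≤ cd.length := by omega
  have h5 : ((k : Int) + 5) = ((k : Int) + ((5 : Nat) : Int)) := by norm_num
  simp only [pvCoreA5, pvClassify5, pvSMStep, h5, PySem.List.slice_natCast_add,
    PySem.List.pyGetD_ofNat']
  rw [pv_getD_td cd k 0 5 (by omega) hk5, pv_getD_td cd k 1 5 (by omega) hk5,
      pv_getD_td cd k 2 5 (by omega) hk5, pv_getD_td cd k 3 5 (by omega) hk5,
      pv_getD_td cd k 4 5 (by omega) hk5,
      pv_bits_getD cd k (by omega), pv_bits_getD cd (k + 1) (by omega),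
      pv_bits_getD cd (k + 2) (by omega), pv_bits_getD cd (k + 3) (by omega),
      pv_bits_getD cd (k + 4) (by omega)]
  simp only [Nat.add_zero]
  generalize List.getD cd k "" = x0
  generalize List.getD cd (k + 1) "" = x1
  generalize List.getD cd (k + 2) "" = x2
  generalize List.getD cd (k + 3) "" = x3
  generalize List.getD cd (k + 4) "" = x4
  by_cases h0 : x0 = pvBlack <;> by_cases h1 : x1 = pvBlack <;>
    by_cases h2 : x2 = pvBlack <;> by_cases h3 : x3 = pvBlack <;>
    by_cases h4 : x4 = pvBlack <;> simp [h0, h1, h2, h3, h4]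

theorem pv_core4_eq (cd : List String) (st : List Int × List Int × Int × Int) (k : Nat)
    (hk : k < cd.length - 3) :
    pvCoreA4 cd st (k : Int) = pvSMStep st (pvClassify4 (pvBits cd) k) := by
  obtain ⟨sv2, sv3, s2, s3⟩ := st
  have hk4 : k + 4 ≤ cd.length := by omega
  have h4c : ((k : Int) + 4) = ((k : Int) + ((4 : Nat) : Int)) := by norm_num
  simp only [pvCoreA4, pvClassify4, pvSMStep, h4c, PySem.List.slice_natCast_add,
    PySem.List.pyGetD_ofNat']
  rw [pv_getD_td cd k 0 4 (by omega) hk4, pv_getD_td cd k 1 4 (by omega) hk4,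
      pv_getD_td cd k 2 4 (by omega) hk4, pv_getD_td cd k 3 4 (by omega) hk4,
      pv_bits_getD cd k (by omega), pv_bits_getD cd (k + 1) (by omega),
      pv_bits_getD cd (k + 2) (by omega), pv_bits_getD cd (k + 3) (by omega)]
  simp only [Nat.add_zero]
  generalize List.getD cd k "" = x0
  generalize List.getD cd (k + 1) "" = x1
  generalize List.getD cd (k + 2) "" = x2
  generalize List.getD cd (k + 3) "" = x3
  by_cases h0 : x0 = pvBlack <;> by_cases h1 : x1 = pvBlack <;>
    by_cases h2 : x2 = pvBlack <;> by_cases h3 : x3 = pvBlack <;>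
    simp [h0, h1, h2, h3]

-- the s0 accumulator: first component is the initial list ++ map
theorem pv_foldl_append_map {ι : Type} (g : ι → Int) (l : List ι) (a : List Int) (s : Int) :
    (l.foldl (fun (st : List Int × Int) k => (st.1 ++ [g k], g k)) (a, s)).1
      = a ++ l.map g := by
  induction l generalizing a s with
  | nil => simp
  | cons x xs ih => simp [List.foldl_cons, ih]

theorem pv_range_map_bits (cd : List String) :
    (List.range cd.length).map (fun k => if cd.getD k "" = pvBlack then 0 else (1 : Int))
      = pvBits cd := by
  unfold pvBits
  apply List.ext_getElem
  · simp
  · intro i h1 h2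
    simp only [List.getElem_map, List.getElem_range]
    rw [List.getD_eq_getElem _ _ (by simpa using h2)]

-- A's guarded fold over the full range reduces to the event state machine
theorem pv_groupA (cd : List String) (w : Nat)
    (core : List Int × List Int × Int × Int → Int → List Int × List Int × Int × Int)
    (cls : Nat → Int)
    (hcore : ∀ st k, k < cd.length - w → core st (k : Int) = pvSMStep st (cls k)) :
    (List.range cd.length).foldl
      (fun a (k : Nat) => if (k : Int) < (cd.length : Int) - (w : Int) then core a (k : Int) else a)
      ([], [], 0, 0)
      = ((List.range (cd.length - w)).map cls).foldl pvSMStep ([], [], 0, 0) := by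
  have e1 : (List.range cd.length).foldl
      (fun a (k : Nat) => if (k : Int) < (cd.length : Int) - (w : Int) then core a (k : Int) else a)
      ([], [], 0, 0)
      = (List.range cd.length).foldl
        (fun a (k : Nat) => if k < cd.length - w then core a (k : Int) else a) ([], [], 0, 0) := by
    apply pv_foldl_congr
    intro a k hk
    have hkc : k < cd.length := List.mem_range.mp hk
    have hiff : ((k : Int) < (cd.length : Int) - (w : Int)) ↔ (k < cd.length - w) := by omega
    split_ifs with hA hB hB <;>
      first | rfl | (exact absurd (hiff.mp hA) hB) | (exact absurd (hiff.mpr hB) hA)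
  rw [e1, pv_foldl_range_guard, Nat.min_eq_left (by omega), List.foldl_map]
  exact pv_foldl_congr _ (fun a k hk => hcore a k (List.mem_range.mp hk))

-- ===== VERDICT =====
theorem analyze_colors_spec : Claim_equal_analyze_colors := by
  intro cd _
  unfold Spec_analyze_colors analyze_colors analyze_colors_alt
  simp only [pvBits, List.length_map]
  rw [pv_foldl_pyRange,
      pv_foldl_prod3 (fun a (k : Nat) => pvStepA5 cd (cd.length : Int) a (k : Int))
        (fun a (k : Nat) => pvStepA4 cd (cd.length : Int) a (k : Int))
        (fun a (k : Nat) => pvStepA0 cd a (k : Int))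
        (List.range cd.length) ([], [], 0, 0) ([], [], 0, 0) ([], 0)]
  have h5 : (List.range cd.length).foldl
      (fun a (k : Nat) => pvStepA5 cd (cd.length : Int) a (k : Int)) ([], [], 0, 0)
      = ((List.range (cd.length - 4)).map (pvClassify5 (pvBits cd))).foldl
          pvSMStep ([], [], 0, 0) := by
    rw [← pv_groupA cd 4 (pvCoreA5 cd) (pvClassify5 (pvBits cd))
          (fun st k hk => pv_core5_eq cd st k hk)]
    apply pv_foldl_congr
    intro a k _
    simp only [pvStepA5, Nat.cast_ofNat]
  have h4 : (List.range cd.length).foldl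
      (fun a (k : Nat) => pvStepA4 cd (cd.length : Int) a (k : Int)) ([], [], 0, 0)
      = ((List.range (cd.length - 3)).map (pvClassify4 (pvBits cd))).foldl
          pvSMStep ([], [], 0, 0) := by
    rw [← pv_groupA cd 3 (pvCoreA4 cd) (pvClassify4 (pvBits cd))
          (fun st k hk => pv_core4_eq cd st k hk)]
    apply pv_foldl_congr
    intro a k _
    simp only [pvStepA4, Nat.cast_ofNat]
  have h0 : ((List.range cd.length).foldl
      (fun a (k : Nat) => pvStepA0 cd a (k : Int)) (([] : List Int), (0 : Int))).1
      = pvBits cd := by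
    have e1 : (List.range cd.length).foldl (fun a (k : Nat) => pvStepA0 cd a (k : Int)) ([], 0)
        = (List.range cd.length).foldl
          (fun (st : List Int × Int) k =>
            (st.1 ++ [if cd.getD k "" = pvBlack then 0 else 1],
             if cd.getD k "" = pvBlack then 0 else 1)) ([], 0) := by
      apply pv_foldl_congr
      intro a k _
      unfold pvStepA0
      rw [PySem.List.pyGetD_natCast]
    rw [e1, pv_foldl_append_map, pv_range_map_bits]
    rfl
  rw [h5, h4, h0, pv_sm_eq_counters, pv_sm_eq_counters]
  rfl
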